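-- pv_equiv track=rewrite | github.com/ZhePang/Sudoku_Solver_AC3 | sudoku.py | getNeighborArcs
-- ===== SOURCE A (Python) =====
-- ROW = "ABCDEFGHI"
--
-- COL = "123456789"
--
-- def getNeighborArcs(r, c):
--     """function to get all possible arc pairs for one position"""
--     arcs = {}
--     pos = r + c
--
--     # get all positions in the same row
--     for col in COL:
--         if (col != c):
--             arcs[(pos, r + col)] = 1
--     # get all positions in the same column
--     for row in ROW:
--         if (row != r):
--             arcs[(pos, row + c)] = 1
--     # get all positions in the same box
--     for row in ROW:
--         for col in COL:
--             if (getBoxNum(row, col) == getBoxNum(r, c)):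
--                 if (row != r or col != c):
--                     arcs[(pos, row + col)] = 1
--
--     return arcs.keys()
--
-- def getBoxNum(r, c):
--     """Helper function to get the box number of a position"""
--     x = ROW.find(r) - ROW.find("A")
--     y = COL.find(c) - COL.find("1")
--     return x // 3 * 3 + y // 3
-- ===== SOURCE B (Python) =====
-- ROW = "ABCDEFGHI"
--
-- COL = "123456789"
--
-- def getNeighborArcs(r, c):
--     """function to get all possible arc pairs for one position"""
--     pos = r + c
--     arcs = {}
--     for col in COL:
--         if col != c:
--             arcs[(pos, r + col)] = 1
--     for row in ROW:
--         if row != r: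
--             arcs[(pos, row + c)] = 1
--     # walk the 3x3 box band directly instead of scanning all 81 cells
--     br = ROW.find(r) // 3 * 3
--     bc = COL.find(c) // 3 * 3
--     for row in ROW[br:br+3]:
--         for col in COL[bc:bc+3]:
--             if row != r or col != c:
--                 arcs[(pos, row + col)] = 1
--     return arcs.keys()
-- ===== Notes on version B (the rewrite author's own statement) =====
-- stated objective: simpler
-- what changed: Instead of scanning all 81 cells and comparing box numbers via the getBoxNum helper, B computes the box band from ROW.find(r) and COL.find(c) and walks only the 3x3 slice of that band, keeping the row/column loops and dict-based dedup unchanged.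
-- intended difference: On inputs where c does not occur in COL but ROW.find(r) >= 3, A's getBoxNum wraps find's -1 into the box number 3*(ROW.find(r)//3)-1 and A returns the row/column peers plus the nine cells of that unrelated box (for r='D' and c='x' the nine spurious peers lie in rows A-C, columns 7-9); B returns only the row/column peers, which is the intended value since an invalid column has no box. — e.g. on getNeighborArcs("D", "x"): A returns [("Dx", "D1"), ("Dx", "D2"), ("Dx", "D3"), ("Dx", "D4"), ("Dx", "D5"), ("Dx", "D6"), ("Dx", "D7"), ("Dx", "D8"), ("Dx",…, B returns [("Dx", "D1"), ("Dx", "D2"), ("Dx", "D3"), ("Dx", "D4"), ("Dx", "D5"), ("Dx", "D6"), ("Dx", "D7"), ("Dx", "D8"), ("Dx",…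
import Mathlib
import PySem

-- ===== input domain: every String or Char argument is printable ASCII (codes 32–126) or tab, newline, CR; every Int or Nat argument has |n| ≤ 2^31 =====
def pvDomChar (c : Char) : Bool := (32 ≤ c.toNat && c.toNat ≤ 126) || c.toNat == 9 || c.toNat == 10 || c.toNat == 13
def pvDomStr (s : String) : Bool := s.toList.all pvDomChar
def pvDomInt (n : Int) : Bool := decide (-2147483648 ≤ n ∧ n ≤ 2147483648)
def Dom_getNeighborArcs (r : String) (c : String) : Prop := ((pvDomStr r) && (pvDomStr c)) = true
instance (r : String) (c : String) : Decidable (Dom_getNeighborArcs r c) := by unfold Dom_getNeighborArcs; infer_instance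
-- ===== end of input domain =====

-- B walks the 3x3 box band computed from ROW.find(r)/COL.find(c) instead of scanning all 81 cells (objective: simpler).

-- ===== PORT A =====
-- Python getBoxNum, on char lists (ROW.find / COL.find = PySem.Chars.find, '//' = PySem.Int.floordiv)
def getBoxNumC (rs : List Char) (cs : List Char) : Int :=
  let x := PySem.Chars.find "ABCDEFGHI".toList rs - PySem.Chars.find "ABCDEFGHI".toList "A".toList
  let y := PySem.Chars.find "123456789".toList cs - PySem.Chars.find "123456789".toList "1".toList
  PySem.Int.floordiv x 3 * 3 + PySem.Int.floordiv y 3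

-- Python getBoxNum(r, c) on strings; loop variables (single chars) enter getBoxNumC as [row], [col]
def getBoxNum (r : String) (c : String) : Int :=
  getBoxNumC r.toList c.toList

def getNeighborArcs (r : String) (c : String) : List (String × String) :=
  let pos := r ++ c
  let arcs : PySem.Dict (String × String) Int := PySem.Dict.empty
  -- for col in COL: if col != c: arcs[(pos, r + col)] = 1
  let arcs := "123456789".toList.foldl (fun arcs col =>
    if String.singleton col ≠ c then arcs.insert (pos, r ++ String.singleton col) 1 else arcs) arcs
  -- for row in ROW: if row != r: arcs[(pos, row + c)] = 1
  let arcs := "ABCDEFGHI".toList.foldl (fun arcs row =>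
    if String.singleton row ≠ r then arcs.insert (pos, String.singleton row ++ c) 1 else arcs) arcs
  -- for row in ROW: for col in COL: if getBoxNum(row, col) == getBoxNum(r, c): ...
  let arcs := "ABCDEFGHI".toList.foldl (fun arcs row =>
    "123456789".toList.foldl (fun arcs col =>
      if getBoxNumC [row] [col] = getBoxNum r c then
        if String.singleton row ≠ r ∨ String.singleton col ≠ c then
          arcs.insert (pos, String.singleton row ++ String.singleton col) 1
        else arcs
      else arcs) arcs) arcs
  arcs.keys

-- ===== PORT B =====
def getNeighborArcs_alt (r : String) (c : String) : List (String × String) :=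
  let pos := r ++ c
  let arcs : PySem.Dict (String × String) Int := PySem.Dict.empty
  let arcs := "123456789".toList.foldl (fun arcs col =>
    if String.singleton col ≠ c then arcs.insert (pos, r ++ String.singleton col) 1 else arcs) arcs
  let arcs := "ABCDEFGHI".toList.foldl (fun arcs row =>
    if String.singleton row ≠ r then arcs.insert (pos, String.singleton row ++ c) 1 else arcs) arcs
  -- br = ROW.find(r)//3*3; bc = COL.find(c)//3*3; walk ROW[br:br+3] x COL[bc:bc+3]
  let br := PySem.Int.floordiv (PySem.Chars.find "ABCDEFGHI".toList r.toList) 3 * 3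
  let bc := PySem.Int.floordiv (PySem.Chars.find "123456789".toList c.toList) 3 * 3
  let arcs :=
    (PySem.List.slice "ABCDEFGHI".toList (some br) (some (br + 3))).foldl (fun arcs row =>
      (PySem.List.slice "123456789".toList (some bc) (some (bc + 3))).foldl (fun arcs col =>
        if String.singleton row ≠ r ∨ String.singleton col ≠ c then
          arcs.insert (pos, String.singleton row ++ String.singleton col) 1
        else arcs) arcs) arcs
  arcs.keys

-- ===== PRECONDITION & SPEC =====
-- On inputs where c does not occur in COL but ROW.find(r) >= 3, A's getBoxNum wraps find's -1 into
-- the box number 3*(ROW.find(r)//3)-1 and A returns the row/column peers plus the nine cells of that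
-- unrelated box; B returns only the row/column peers, the intended value (an invalid column has no box).
def D_getNeighborArcs (r : String) (c : String) : Prop :=
  PySem.Str.find "123456789" c = -1 ∧ 3 ≤ PySem.Str.find "ABCDEFGHI" r
instance (r : String) (c : String) : Decidable (D_getNeighborArcs r c) := by
  unfold D_getNeighborArcs; infer_instance

def Spec_getNeighborArcs (r : String) (c : String) (out : List (String × String)) : Prop :=
  ¬ D_getNeighborArcs r c → out = getNeighborArcs_alt r c
instance (r : String) (c : String) (out : List (String × String)) : Decidable (Spec_getNeighborArcs r c out) := by
  unfold Spec_getNeighborArcs; infer_instance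

def pvDiffWitness_getNeighborArcs : String × String := ("D", "x")
def pvDiffWitnessOut_getNeighborArcs : (List (String × String)) × (List (String × String)) :=
  ([("Dx", "D1"), ("Dx", "D2"), ("Dx", "D3"), ("Dx", "D4"), ("Dx", "D5"), ("Dx", "D6"), ("Dx", "D7"), ("Dx", "D8"), ("Dx", "D9"), ("Dx", "Ax"), ("Dx", "Bx"), ("Dx", "Cx"), ("Dx", "Ex"), ("Dx", "Fx"), ("Dx", "Gx"), ("Dx", "Hx"), ("Dx", "Ix"), ("Dx", "A7"), ("Dx", "A8"), ("Dx", "A9"), ("Dx", "B7"), ("Dx", "B8"), ("Dx", "B9"), ("Dx", "C7"), ("Dx", "C8"), ("Dx", "C9")],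
   [("Dx", "D1"), ("Dx", "D2"), ("Dx", "D3"), ("Dx", "D4"), ("Dx", "D5"), ("Dx", "D6"), ("Dx", "D7"), ("Dx", "D8"), ("Dx", "D9"), ("Dx", "Ax"), ("Dx", "Bx"), ("Dx", "Cx"), ("Dx", "Ex"), ("Dx", "Fx"), ("Dx", "Gx"), ("Dx", "Hx"), ("Dx", "Ix")])

-- ===== CLAIM =====
def Claim_unchanged_getNeighborArcs : Prop :=
  ∀ (r : String) (c : String), Dom_getNeighborArcs r c → Spec_getNeighborArcs r c (getNeighborArcs r c)
def Claim_changed_getNeighborArcs : Prop :=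
  Dom_getNeighborArcs (pvDiffWitness_getNeighborArcs.1) (pvDiffWitness_getNeighborArcs.2) ∧
  D_getNeighborArcs (pvDiffWitness_getNeighborArcs.1) (pvDiffWitness_getNeighborArcs.2) ∧
  getNeighborArcs (pvDiffWitness_getNeighborArcs.1) (pvDiffWitness_getNeighborArcs.2) = pvDiffWitnessOut_getNeighborArcs.1 ∧
  getNeighborArcs_alt (pvDiffWitness_getNeighborArcs.1) (pvDiffWitness_getNeighborArcs.2) = pvDiffWitnessOut_getNeighborArcs.2 ∧
  pvDiffWitnessOut_getNeighborArcs.1 ≠ pvDiffWitnessOut_getNeighborArcs.2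
def Claim_exact_getNeighborArcs : Prop :=
  ∀ (r : String) (c : String), Dom_getNeighborArcs r c → D_getNeighborArcs r c →
    getNeighborArcs r c ≠ getNeighborArcs_alt r c

-- ===== LEMMAS AND PROOFS =====

-- find into a 9-char haystack is at most 8 (index 9 would mean a prefix of [], i.e. the empty needle, found at 0)
theorem pv_find_le_eight (s : List Char) (hs : s.length = 9) (t : List Char) :
    PySem.Chars.find s t ≤ 8 := by
  have hle := PySem.Chars.find_le_length s t
  rw [hs] at hle
  rcases lt_or_eq_of_le hle with h | h
  · omega
  · exfalso
    have hnn : 0 ≤ PySem.Chars.find s t := by omega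
    have hsp := (PySem.Chars.find_spec (s := s) (sub := t) hnn).1
    rw [h] at hsp
    have h0 : s.drop 9 = [] := by
      apply List.drop_eq_nil_of_le; omega
    simp only [Int.toNat_natCast, h0, List.prefix_nil] at hsp
    subst hsp
    rw [PySem.Chars.find_nil] at h
    omega

-- a nested for-loop is a fold over the list of index pairs
theorem pv_nested_flat {β : Type} (g : β → Char → Char → β) (rows cols : List Char) (d : β) :
    rows.foldl (fun a row => cols.foldl (fun a col => g a row col) a) d
      = (rows.flatMap (fun row => cols.map (Prod.mk row))).foldl (fun a rc => g a rc.1 rc.2) d := by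
  rw [List.foldl_flatMap]
  simp [List.foldl_map]

-- a guarded fold is a fold over the filtered list
theorem pv_foldl_ite {α β : Type} (P : α → Prop) [DecidablePred P] (f : β → α → β) (l : List α) (d : β) :
    l.foldl (fun x a => if P a then f x a else x) d
      = (l.filter (fun a => decide (P a))).foldl f d := by
  rw [List.foldl_filter]
  simp

-- the cells of ROW x COL whose box number is p*3+q form exactly the band slices, outside the D_ cases
theorem pv_filter_band (p q : Int) (hp1 : -1 ≤ p) (hp2 : p ≤ 2) (hq1 : -1 ≤ q) (hq2 : q ≤ 2)
    (hD : ¬ (q = -1 ∧ 1 ≤ p)) :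
    (("ABCDEFGHI".toList.flatMap (fun row => "123456789".toList.map (Prod.mk row))).filter
        (fun rc => decide (getBoxNumC [rc.1] [rc.2] = p * 3 + q)))
      = (PySem.List.slice "ABCDEFGHI".toList (some (p * 3)) (some (p * 3 + 3))).flatMap (fun row =>
          (PySem.List.slice "123456789".toList (some (q * 3)) (some (q * 3 + 3))).map (Prod.mk row)) := by
  interval_cases p <;> interval_cases q <;>
    first
      | decide
      | (exact absurd ⟨rfl, by norm_num⟩ hD)

-- A's box scan equals B's band walk, over any dict accumulated so far, outside D_
theorem pv_box_eq (r c pos : String) (d : PySem.Dict (String × String) Int)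
    (hD : ¬ D_getNeighborArcs r c) :
    "ABCDEFGHI".toList.foldl (fun arcs row =>
        "123456789".toList.foldl (fun arcs col =>
          if getBoxNumC [row] [col] = getBoxNum r c then
            if String.singleton row ≠ r ∨ String.singleton col ≠ c then
              arcs.insert (pos, String.singleton row ++ String.singleton col) 1
            else arcs
          else arcs) arcs) d
      = (PySem.List.slice "ABCDEFGHI".toList
            (some (PySem.Int.floordiv (PySem.Chars.find "ABCDEFGHI".toList r.toList) 3 * 3))
            (some (PySem.Int.floordiv (PySem.Chars.find "ABCDEFGHI".toList r.toList) 3 * 3 + 3))).foldl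
          (fun arcs row =>
            (PySem.List.slice "123456789".toList
                (some (PySem.Int.floordiv (PySem.Chars.find "123456789".toList c.toList) 3 * 3))
                (some (PySem.Int.floordiv (PySem.Chars.find "123456789".toList c.toList) 3 * 3 + 3))).foldl
              (fun arcs col =>
                if String.singleton row ≠ r ∨ String.singleton col ≠ c then
                  arcs.insert (pos, String.singleton row ++ String.singleton col) 1
                else arcs) arcs) d := by
  have e1 : PySem.Chars.find "ABCDEFGHI".toList "A".toList = 0 := by decide
  have e2 : PySem.Chars.find "123456789".toList "1".toList = 0 := by decide
  set x := PySem.Chars.find "ABCDEFGHI".toList r.toList with hx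
  set y := PySem.Chars.find "123456789".toList c.toList with hy
  have hxl : -1 ≤ x := PySem.Chars.neg_one_le_find _ _
  have hxu : x ≤ 8 := pv_find_le_eight _ (by decide) _
  have hyl : -1 ≤ y := PySem.Chars.neg_one_le_find _ _
  have hyu : y ≤ 8 := pv_find_le_eight _ (by decide) _
  set p := PySem.Int.floordiv x 3 with hp
  set q := PySem.Int.floordiv y 3 with hq
  have hp1 : -1 ≤ p := by rw [hp, PySem.Int.le_floordiv_iff_mul_le (by norm_num)]; omega
  have hp2 : p ≤ 2 := by
    have := (PySem.Int.floordiv_lt_iff_lt_mul (a := x) (b := 3) (q := 3) (by norm_num)).2 (by omega)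
    omega
  have hq1 : -1 ≤ q := by rw [hq, PySem.Int.le_floordiv_iff_mul_le (by norm_num)]; omega
  have hq2 : q ≤ 2 := by
    have := (PySem.Int.floordiv_lt_iff_lt_mul (a := y) (b := 3) (q := 3) (by norm_num)).2 (by omega)
    omega
  have hbox : getBoxNum r c = p * 3 + q := by
    simp only [getBoxNum, getBoxNumC]
    rw [e1, e2]
    simp only [sub_zero]
    rw [hp, hq, hx, hy]
  have hD' : ¬ (q = -1 ∧ 1 ≤ p) := by
    intro ⟨hq1', hp1'⟩
    apply hD
    unfold D_getNeighborArcs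
    rw [PySem.Str.find_eq, PySem.Str.find_eq, ← hx, ← hy]
    constructor
    · -- q = -1 → y = -1
      have : y < 0 := by
        by_contra hge
        push Not at hge
        have : 0 ≤ q := by rw [hq, PySem.Int.le_floordiv_iff_mul_le (by norm_num)]; omega
        omega
      omega
    · -- 1 ≤ p → 3 ≤ x
      rw [hp, PySem.Int.le_floordiv_iff_mul_le (by norm_num)] at hp1'
      omega
  rw [hbox]
  rw [pv_nested_flat, pv_foldl_ite, pv_filter_band p q hp1 hp2 hq1 hq2 hD', pv_nested_flat]

-- ===== VERDICT =====
theorem getNeighborArcs_spec : Claim_unchanged_getNeighborArcs := by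
  intro r c _ hD
  simp only [getNeighborArcs, getNeighborArcs_alt]
  exact congrArg PySem.Dict.keys (pv_box_eq r c (r ++ c) _ hD)

set_option maxRecDepth 100000 in
set_option maxHeartbeats 1000000 in
theorem getNeighborArcs_changed : Claim_changed_getNeighborArcs := by
  unfold Claim_changed_getNeighborArcs; decide

-- membership in the keys of a conditional-insert fold
theorem pv_mem_keys_foldl {α κ ν : Type} [BEq κ] [LawfulBEq κ]
    (l : List α) (P : α → Prop) [DecidablePred P] (key : α → κ) (val : ν)
    (d : PySem.Dict κ ν) (k : κ) :
    (k ∈ (l.foldl (fun d a => if P a then d.insert (key a) val else d) d).keys) ↔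
      (k ∈ d.keys ∨ ∃ a ∈ l, P a ∧ k = key a) := by
  induction l generalizing d with
  | nil => simp
  | cons a l ih =>
    simp only [List.foldl_cons]
    by_cases h : P a
    · rw [if_pos h, ih]
      simp only [PySem.Dict.mem_keys_insert, List.mem_cons]
      constructor
      · rintro (⟨rfl | hk⟩ | ⟨b, hb, hPb, rfl⟩)
        · exact Or.inr ⟨a, Or.inl rfl, h, rfl⟩
        · exact Or.inl hk
        · exact Or.inr ⟨b, Or.inr hb, hPb, rfl⟩
      · rintro (hk | ⟨b, (rfl | hb), hPb, rfl⟩)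
        · exact Or.inl (Or.inr hk)
        · exact Or.inl (Or.inl rfl)
        · exact Or.inr ⟨b, hb, hPb, rfl⟩
    · rw [if_neg h, ih]
      constructor
      · rintro (hk | ⟨b, hb, hPb, rfl⟩)
        · exact Or.inl hk
        · exact Or.inr ⟨b, List.mem_cons_of_mem _ hb, hPb, rfl⟩
      · rintro (hk | ⟨b, hb, hPb, rfl⟩)
        · exact Or.inl hk
        · rcases List.mem_cons.1 hb with rfl | hb'
          · exact absurd hPb h
          · exact Or.inr ⟨b, hb', hPb, rfl⟩

-- inside D_ the ports differ: A inserts the nine cells of the phantom box 3*(x//3)-1, B inserts none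
theorem getNeighborArcs_tight : Claim_exact_getNeighborArcs := by
  intro r c _ hD hEq
  obtain ⟨hc0, hr0⟩ := hD
  have hc : PySem.Chars.find "123456789".toList c.toList = -1 := by
    simpa [PySem.Str.find_eq] using hc0
  have hr : (3 : Int) ≤ PySem.Chars.find "ABCDEFGHI".toList r.toList := by
    simpa [PySem.Str.find_eq] using hr0
  have e1 : PySem.Chars.find "ABCDEFGHI".toList "A".toList = 0 := by decide
  have e2 : PySem.Chars.find "123456789".toList "1".toList = 0 := by decide
  set x := PySem.Chars.find "ABCDEFGHI".toList r.toList with hx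
  have hxu : x ≤ 8 := pv_find_le_eight _ (by decide) _
  have hd1 : PySem.Int.floordiv (-1) 3 = -1 := by decide
  -- B's column band is empty: COL[-3:0] = []
  have hslice : PySem.List.slice "123456789".toList (some (PySem.Int.floordiv (-1) 3 * 3))
      (some (PySem.Int.floordiv (-1) 3 * 3 + 3)) = [] := by decide
  simp only [getNeighborArcs, getNeighborArcs_alt] at hEq
  rw [hc, hslice] at hEq
  simp only [List.foldl_nil] at hEq
  rw [List.foldl_fixed] at hEq
  -- name the dict after the row/column loops
  set d2 : PySem.Dict (String × String) Int := "ABCDEFGHI".toList.foldl (fun arcs row =>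
      if String.singleton row ≠ r then arcs.insert (r ++ c, String.singleton row ++ c) 1 else arcs)
    ("123456789".toList.foldl (fun arcs col =>
      if String.singleton col ≠ c then arcs.insert (r ++ c, r ++ String.singleton col) 1 else arcs)
      PySem.Dict.empty) with hd2
  -- the box cell (row0, '7') that A inserts and B does not
  by_cases hx5 : x ≤ 5
  · -- x ∈ [3,5]: box 2, rows "ABC"
    have hp : PySem.Int.floordiv x 3 = 1 := by
      have h1 : (1 : Int) ≤ PySem.Int.floordiv x 3 := by
        rw [PySem.Int.le_floordiv_iff_mul_le (by norm_num)]; omega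
      have h2 := (PySem.Int.floordiv_lt_iff_lt_mul (a := x) (b := 3) (q := 2) (by norm_num)).2 (by omega)
      omega
    have hbox : getBoxNum r c = 2 := by
      simp only [getBoxNum, getBoxNumC]
      rw [e1, e2]
      simp only [sub_zero]
      rw [hc, ← hx, hp, hd1]
      norm_num
    rw [hbox, pv_nested_flat, pv_foldl_ite] at hEq
    have hfil : (("ABCDEFGHI".toList.flatMap (fun row => "123456789".toList.map (Prod.mk row))).filter
        (fun rc => decide (getBoxNumC [rc.1] [rc.2] = 2)))
        = [('A','7'),('A','8'),('A','9'),('B','7'),('B','8'),('B','9'),('C','7'),('C','8'),('C','9')] := by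
      decide
    rw [hfil] at hEq
    have h7 : String.singleton '7' ≠ c := by
      intro h
      rw [← h] at hc
      exact absurd hc (by decide)
    have hmemA : (r ++ c, String.singleton 'A' ++ String.singleton '7') ∈
        ([('A','7'),('A','8'),('A','9'),('B','7'),('B','8'),('B','9'),('C','7'),('C','8'),('C','9')].foldl
          (fun arcs rc =>
            if String.singleton rc.1 ≠ r ∨ String.singleton rc.2 ≠ c then
              arcs.insert (r ++ c, String.singleton rc.1 ++ String.singleton rc.2) 1
            else arcs) d2).keys :=
      (pv_mem_keys_foldl _ _ _ _ _ _).2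
        (Or.inr ⟨('A','7'), by decide, Or.inr h7, rfl⟩)
    rw [hEq] at hmemA
    -- but that key is not among the row/column arcs
    rw [hd2, pv_mem_keys_foldl _ _ _ _ _ _, pv_mem_keys_foldl _ _ _ _ _ _] at hmemA
    rcases hmemA with ((hmem | ⟨col', _, _, hkey⟩) | ⟨row', _, _, hkey⟩)
    · simp [PySem.Dict.keys, PySem.Dict.empty] at hmem
    · -- (r++c, "A7") = (r++c, r ++ ⟨col'⟩) forces r = "A", contradicting 3 ≤ x
      have h2 := congrArg (fun p : String × String => p.2.toList) hkey
      simp only [String.toList_append, String.toList_singleton] at h2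
      have hl := congrArg List.length h2
      simp at hl
      obtain ⟨a, ha⟩ := List.length_eq_one_iff.1 hl
      rw [ha] at h2
      simp at h2
      have hx0 : x = 0 := by rw [hx, ha, ← h2.1]; decide
      omega
    · -- (r++c, "A7") = (r++c, ⟨row'⟩ ++ c) forces c = "7", contradicting find(c) = -1
      have h2 := congrArg (fun p : String × String => p.2.toList) hkey
      simp only [String.toList_append, String.toList_singleton] at h2
      simp at h2
      rw [← h2.2] at hc
      exact absurd hc (by decide)
  · -- x ∈ [6,8]: box 5, rows "DEF"
    have hp : PySem.Int.floordiv x 3 = 2 := by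
      have h1 : (2 : Int) ≤ PySem.Int.floordiv x 3 := by
        rw [PySem.Int.le_floordiv_iff_mul_le (by norm_num)]; omega
      have h2 := (PySem.Int.floordiv_lt_iff_lt_mul (a := x) (b := 3) (q := 3) (by norm_num)).2 (by omega)
      omega
    have hbox : getBoxNum r c = 5 := by
      simp only [getBoxNum, getBoxNumC]
      rw [e1, e2]
      simp only [sub_zero]
      rw [hc, ← hx, hp, hd1]
      norm_num
    rw [hbox, pv_nested_flat, pv_foldl_ite] at hEq
    have hfil : (("ABCDEFGHI".toList.flatMap (fun row => "123456789".toList.map (Prod.mk row))).filter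
        (fun rc => decide (getBoxNumC [rc.1] [rc.2] = 5)))
        = [('D','7'),('D','8'),('D','9'),('E','7'),('E','8'),('E','9'),('F','7'),('F','8'),('F','9')] := by
      decide
    rw [hfil] at hEq
    have h7 : String.singleton '7' ≠ c := by
      intro h
      rw [← h] at hc
      exact absurd hc (by decide)
    have hmemA : (r ++ c, String.singleton 'D' ++ String.singleton '7') ∈
        ([('D','7'),('D','8'),('D','9'),('E','7'),('E','8'),('E','9'),('F','7'),('F','8'),('F','9')].foldl
          (fun arcs rc =>
            if String.singleton rc.1 ≠ r ∨ String.singleton rc.2 ≠ c then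
              arcs.insert (r ++ c, String.singleton rc.1 ++ String.singleton rc.2) 1
            else arcs) d2).keys :=
      (pv_mem_keys_foldl _ _ _ _ _ _).2
        (Or.inr ⟨('D','7'), by decide, Or.inr h7, rfl⟩)
    rw [hEq] at hmemA
    rw [hd2, pv_mem_keys_foldl _ _ _ _ _ _, pv_mem_keys_foldl _ _ _ _ _ _] at hmemA
    rcases hmemA with ((hmem | ⟨col', _, _, hkey⟩) | ⟨row', _, _, hkey⟩)
    · simp [PySem.Dict.keys, PySem.Dict.empty] at hmem
    · have h2 := congrArg (fun p : String × String => p.2.toList) hkey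
      simp only [String.toList_append, String.toList_singleton] at h2
      have hl := congrArg List.length h2
      simp at hl
      obtain ⟨a, ha⟩ := List.length_eq_one_iff.1 hl
      rw [ha] at h2
      simp at h2
      have hx0 : x = 3 := by rw [hx, ha, ← h2.1]; decide
      omega
    · have h2 := congrArg (fun p : String × String => p.2.toList) hkey
      simp only [String.toList_append, String.toList_singleton] at h2
      simp at h2
      rw [← h2.2] at hc
      exact absurd hc (by decide)
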